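-- pv_equiv track=rewrite | github.com/marcoce005/Python | poli/esercitazione10/es10.2.3/es10.2.3.py | get_couple
-- ===== SOURCE A (Python) =====
-- def are_there_2_char(s):
--     count = 0
--     for c in s:
--         if count == 2:
--             return True
--         if 65 <= ord(c.upper()) <= 90:
--             count += 1
--     return False
--
-- def get_couple(s):
--     el = []
--     i = 0
--     pre = ""
--     middle = ""
--
--     if not are_there_2_char(s):
--         return el, s, middle
--
--     while len(el) != 2:
--         if 65 <= ord(s[i].upper()) <= 90:
--             el.append(s[i])
--         else:
--             if len(el) == 0:
--                 pre += s[i]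
--             else:
--                 middle += s[i]
--         i += 1
--
--     return el, pre, middle
-- ===== SOURCE B (Python) =====
-- def _split_at_letter(s):
--     """Split s around its first letter: (text_before, letter, text_after), or None."""
--     pre = ""
--     for i, c in enumerate(s):
--         if 65 <= ord(c.upper()) <= 90:
--             return pre, c, s[i + 1:]
--         pre += c
--     return None
--
-- def get_couple(s):
--     first = _split_at_letter(s)
--     if first is None:
--         return [], s, ""
--     pre, c1, rest = first
--     second = _split_at_letter(rest)
--     if second is None:
--         return [], s, ""
--     middle, c2, _ = second
--     return [c1, c2], pre, middle
-- ===== Notes on version B (the rewrite author's own statement) =====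
-- stated objective: simpler
-- what changed: Replaces A's pre-scan guard plus stateful while-loop (mutating el/pre/middle with an index) by a single helper that splits the string around its first letter, applied twice: find first letter -> (pre, c1, rest), find first letter of rest -> (middle, c2, _).
-- intended difference: On strings whose second letter (by the predicate 65<=ord(c.upper())<=90) is the very last character (e.g. 'ab'), A's guard are_there_2_char only counts a second letter if some character follows it, so A returns ([], s, ''); B returns the couple ([c1,c2], pre, middle), which is the intended value since two letters are present. — e.g. on get_couple("ab"): A returns ([], "ab", ""), B returns (["a", "b"], "", "")
import Mathlib
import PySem

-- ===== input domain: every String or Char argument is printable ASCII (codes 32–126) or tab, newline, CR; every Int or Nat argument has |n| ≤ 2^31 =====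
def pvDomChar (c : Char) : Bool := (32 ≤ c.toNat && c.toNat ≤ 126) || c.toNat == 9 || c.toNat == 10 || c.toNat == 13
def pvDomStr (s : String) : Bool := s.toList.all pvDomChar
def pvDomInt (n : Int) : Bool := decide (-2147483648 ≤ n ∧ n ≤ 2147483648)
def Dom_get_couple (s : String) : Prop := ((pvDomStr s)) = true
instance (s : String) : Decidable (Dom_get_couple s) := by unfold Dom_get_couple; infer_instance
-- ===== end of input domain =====

-- B is simpler: one split-around-first-letter helper applied twice, instead of A's guard
-- pre-scan plus stateful index loop; return values only (neither version mutates arguments).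

-- the predicate `65 <= ord(c.upper()) <= 90` both Python sources contain verbatim
-- (PySem.Chars.upperChar is exact for the single ASCII characters of Dom)
def isTargetLetter (c : Char) : Bool :=
  decide (65 ≤ (PySem.Chars.upperChar c).toNat) && decide ((PySem.Chars.upperChar c).toNat ≤ 90)

-- ===== PORT A =====
def areThere2Char : List Char → Nat → Bool
  | [], _ => false
  | c :: rest, count =>
    if count == 2 then true
    else if isTargetLetter c then areThere2Char rest (count + 1)
    else areThere2Char rest count

-- A's while loop over the remaining characters; the strings pre/middle are kept as List Char
-- (Python's `+=` on str) and wrapped with String.ofList at return.  The `[] => …` arm is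
-- Python's IndexError (unreachable when the guard held); it only makes the recursion total.
def gcLoop : List Char → List String → List Char → List Char → List String × String × String
  | cs, el, pre, mid =>
    if el.length == 2 then (el, String.ofList pre, String.ofList mid)
    else match cs with
      | [] => (el, String.ofList pre, String.ofList mid)
      | c :: rest =>
        if isTargetLetter c then gcLoop rest (el ++ [String.ofList [c]]) pre mid
        else if el.length == 0 then gcLoop rest el (pre ++ [c]) mid
        else gcLoop rest el pre (mid ++ [c])

def get_couple (s : String) : List String × String × String :=
  if areThere2Char s.toList 0 = false then ([], s, "")
  else gcLoop s.toList [] [] []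

-- ===== PORT B =====
-- the `for i, c in enumerate(s)` loop of _split_at_letter; s[i+1:] is PySem.List.slice
def salLoop (s : List Char) (pre : List Char) : List (Int × Char) → Option (List Char × Char × List Char)
  | [] => none
  | (i, c) :: rest =>
    if isTargetLetter c then some (pre, c, PySem.List.slice s (some (i + 1)) none)
    else salLoop s (pre ++ [c]) rest

def splitAtLetter (s : List Char) : Option (List Char × Char × List Char) :=
  salLoop s [] (PySem.List.enumerate s)

def get_couple_alt (s : String) : List String × String × String :=
  match splitAtLetter s.toList with
  | none => ([], s, "")
  | some (pre, c1, rest) =>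
    match splitAtLetter rest with
    | none => ([], s, "")
    | some (mid, c2, _) => ([String.ofList [c1], String.ofList [c2]], String.ofList pre, String.ofList mid)

-- ===== PRECONDITION & SPEC =====
-- On strings whose second letter (per 65<=ord(c.upper())<=90) is the very last character, A's
-- guard are_there_2_char only counts a second letter if some character FOLLOWS it, so A returns
-- ([], s, ""); B returns the couple ([c1,c2], pre, middle), the intended value since two
-- letters are present.
def D_get_couple (s : String) : Prop :=
  2 ≤ s.toList.countP isTargetLetter ∧ s.toList.dropLast.countP isTargetLetter < 2
instance (s : String) : Decidable (D_get_couple s) := by unfold D_get_couple; infer_instance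

def Spec_get_couple (s : String) (out : List String × String × String) : Prop :=
  ¬ D_get_couple s → out = get_couple_alt s
instance (s : String) (out : List String × String × String) : Decidable (Spec_get_couple s out) := by
  unfold Spec_get_couple; infer_instance

def pvDiffWitness_get_couple : String := "ab"
def pvDiffWitnessOut_get_couple : (List String × String × String) × (List String × String × String) :=
  (([], "ab", ""), (["a", "b"], "", ""))

-- ===== CLAIM (what is proved, stated in full; the proofs are below) =====
def Claim_unchanged_get_couple : Prop := ∀ (s : String), Dom_get_couple s → Spec_get_couple s (get_couple s)
def Claim_changed_get_couple : Prop := Dom_get_couple (pvDiffWitness_get_couple) ∧ D_get_couple (pvDiffWitness_get_couple) ∧ get_couple (pvDiffWitness_get_couple) = pvDiffWitnessOut_get_couple.1 ∧ get_couple_alt (pvDiffWitness_get_couple) = pvDiffWitnessOut_get_couple.2 ∧ pvDiffWitnessOut_get_couple.1 ≠ pvDiffWitnessOut_get_couple.2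
def Claim_exact_get_couple : Prop := ∀ (s : String), Dom_get_couple s → D_get_couple s → get_couple s ≠ get_couple_alt s

-- ===== LEMMAS AND PROOFS =====

-- mathematical split of a string around its first letter
def sp : List Char → Option (List Char × Char × List Char)
  | [] => none
  | c :: rest =>
    if isTargetLetter c then some ([], c, rest)
    else match sp rest with
      | none => none
      | some (a, l, r) => some (c :: a, l, r)

theorem sp_none {cs : List Char} (h : sp cs = none) : ∀ x ∈ cs, isTargetLetter x = false := by
  induction cs with
  | nil => simp
  | cons c rest ih =>
    simp only [sp] at h
    by_cases hc : isTargetLetter c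
    · simp [hc] at h
    · simp only [if_neg hc] at h
      have hrest : sp rest = none := by
        rcases hsp : sp rest with _ | ⟨⟨a, l, r⟩⟩ <;> simp [hsp] at h ⊢
      intro x hx
      rcases List.mem_cons.mp hx with rfl | hx
      · simpa using hc
      · exact ih hrest x hx

theorem sp_some {cs a r : List Char} {c : Char} (h : sp cs = some (a, c, r)) :
    cs = a ++ c :: r ∧ (∀ x ∈ a, isTargetLetter x = false) ∧ isTargetLetter c = true := by
  induction cs generalizing a with
  | nil => simp [sp] at h
  | cons d rest ih =>
    simp only [sp] at h
    by_cases hd : isTargetLetter d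
    · simp only [if_pos hd] at h
      obtain ⟨rfl, rfl, rfl⟩ := by simpa using h
      simpa using hd
    · simp only [if_neg hd] at h
      rcases hsp : sp rest with _ | ⟨⟨a', l', r'⟩⟩ <;> rw [hsp] at h
      · simp at h
      · obtain ⟨rfl, rfl, rfl⟩ := by simpa using h
        obtain ⟨h1, h2, h3⟩ := ih hsp
        refine ⟨by simp [h1], ?_, h3⟩
        intro x hx
        rcases List.mem_cons.mp hx with rfl | hx
        · simpa using hd
        · exact h2 x hx

theorem guard0 (cs : List Char) :
    areThere2Char cs 0 = match sp cs with
      | none => false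
      | some (_, _, r) => areThere2Char r 1 := by
  induction cs with
  | nil => simp [sp, areThere2Char]
  | cons c rest ih =>
    by_cases hc : isTargetLetter c
    · simp [sp, areThere2Char, hc]
    · simp only [sp, areThere2Char, hc, Bool.false_eq_true, reduceIte, Nat.reduceBEq]
      rw [ih]
      rcases hsp : sp rest with _ | ⟨⟨a, l, r⟩⟩ <;> simp

theorem guard1 (cs : List Char) :
    areThere2Char cs 1 = match sp cs with
      | none => false
      | some (_, _, r) => areThere2Char r 2 := by
  induction cs with
  | nil => simp [sp, areThere2Char]
  | cons c rest ih =>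
    by_cases hc : isTargetLetter c
    · simp [sp, areThere2Char, hc]
    · simp only [sp, areThere2Char, hc, Bool.false_eq_true, reduceIte, Nat.reduceBEq]
      rw [ih]
      rcases hsp : sp rest with _ | ⟨⟨a, l, r⟩⟩ <;> simp

theorem guard2 (cs : List Char) : areThere2Char cs 2 = !cs.isEmpty := by
  cases cs <;> simp [areThere2Char]

theorem loop0 (cs pre mid : List Char) :
    gcLoop cs [] pre mid = match sp cs with
      | none => ([], String.ofList (pre ++ cs), String.ofList mid)
      | some (a, c, r) => gcLoop r [String.ofList [c]] (pre ++ a) mid := by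
  induction cs generalizing pre with
  | nil => simp [sp, gcLoop]
  | cons c rest ih =>
    by_cases hc : isTargetLetter c
    · simp [sp, gcLoop, hc]
    · rw [show gcLoop (c :: rest) [] pre mid = gcLoop rest [] (pre ++ [c]) mid by
        simp [gcLoop, hc]]
      rw [ih]
      rcases hsp : sp rest with _ | ⟨⟨a, l, r⟩⟩ <;> simp [sp, hsp, hc]

theorem loop1 (cs : List Char) (x : String) (pre mid : List Char) :
    gcLoop cs [x] pre mid = match sp cs with
      | none => ([x], String.ofList pre, String.ofList (mid ++ cs))
      | some (a, c, _) => ([x, String.ofList [c]], String.ofList pre, String.ofList (mid ++ a)) := by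
  induction cs generalizing mid with
  | nil => simp [sp, gcLoop]
  | cons c rest ih =>
    by_cases hc : isTargetLetter c
    · rw [show gcLoop (c :: rest) [x] pre mid = gcLoop rest [x, String.ofList [c]] pre mid by
        simp [gcLoop, hc]]
      rw [show gcLoop rest [x, String.ofList [c]] pre mid
           = ([x, String.ofList [c]], String.ofList pre, String.ofList mid) by
        rw [gcLoop.eq_def]; simp]
      simp [sp, hc]
    · rw [show gcLoop (c :: rest) [x] pre mid = gcLoop rest [x] pre (mid ++ [c]) by
        simp [gcLoop, hc]]
      rw [ih]
      rcases hsp : sp rest with _ | ⟨⟨a, l, r⟩⟩ <;> simp [sp, hsp, hc]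

theorem sal_spec (s : List Char) : ∀ (tail : List Char) (k : Nat) (pre : List Char),
    tail = s.drop k →
    salLoop s pre (PySem.List.enumerate tail k) = (match sp tail with
      | none => none
      | some (a, c, r) => some (pre ++ a, c, r)) := by
  intro tail
  induction tail with
  | nil => intro k pre _; simp [PySem.List.enumerate_nil, salLoop, sp]
  | cons c rest ih =>
    intro k pre htail
    rw [PySem.List.enumerate_cons]
    by_cases hc : isTargetLetter c
    · simp only [salLoop, if_pos hc, sp]
      have h1 : PySem.List.slice s (some ((k : Int) + 1)) none = s.drop (k + 1) := by
        have := PySem.List.slice_from_natCast s (a := k + 1)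
        simpa using this
      have h2 : s.drop (k + 1) = rest := by
        have h : (s.drop k).tail = rest := by rw [← htail]; rfl
        rwa [List.tail_drop] at h
      simp [h1, h2]
    · simp only [salLoop, if_neg hc]
      have hrest : rest = s.drop (k + 1) := by
        have h : (s.drop k).tail = rest := by rw [← htail]; rfl
        rw [List.tail_drop] at h; exact h.symm
      rw [show ((k : Int) + 1) = (((k + 1 : Nat) : Int)) by push_cast; ring]
      rw [ih (k + 1) (pre ++ [c]) hrest]
      rcases hsp : sp rest with _ | ⟨⟨a, l, r⟩⟩ <;> simp [sp, hsp, hc]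

theorem splitAtLetter_eq_sp (cs : List Char) : splitAtLetter cs = sp cs := by
  have h := sal_spec cs cs 0 [] (by simp)
  rw [Nat.cast_zero] at h
  rw [splitAtLetter, h]
  rcases hsp : sp cs with _ | ⟨⟨a, l, r⟩⟩ <;> simp

theorem countP_zero_of_all_false {l : List Char} (h : ∀ x ∈ l, isTargetLetter x = false) :
    l.countP isTargetLetter = 0 := by
  simp [List.countP_eq_zero]; intro a ha; simpa using h a ha

theorem main_eq : ∀ (s : String), ¬ D_get_couple s → get_couple s = get_couple_alt s := by
  intro s hnD
  rcases hsp1 : sp s.toList with _ | ⟨⟨a, c1, r1⟩⟩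
  · have hg : areThere2Char s.toList 0 = false := by rw [guard0, hsp1]
    simp [get_couple, get_couple_alt, hg, splitAtLetter_eq_sp, hsp1]
  · rcases hsp2 : sp r1 with _ | ⟨⟨b, c2, r2⟩⟩
    · have hg : areThere2Char s.toList 0 = false := by
        simp only [guard0, hsp1, guard1, hsp2]
      simp [get_couple, get_couple_alt, hg, splitAtLetter_eq_sp, hsp1, hsp2]
    · obtain ⟨hcs, ha, hc1⟩ := sp_some hsp1
      obtain ⟨hr1, hb, hc2⟩ := sp_some hsp2
      cases r2 with
      | nil =>
        exfalso
        apply hnD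
        constructor
        · rw [hcs, hr1]
          simp [List.countP_append, hc1, hc2,
                countP_zero_of_all_false ha, countP_zero_of_all_false hb]
        · have : s.toList.dropLast = a ++ c1 :: b := by
            rw [hcs, hr1]
            rw [show a ++ c1 :: (b ++ [c2]) = (a ++ c1 :: b) ++ [c2] by simp]
            exact List.dropLast_concat
          rw [this]
          simp [List.countP_append, hc1,
                countP_zero_of_all_false ha, countP_zero_of_all_false hb]
      | cons z zs =>
        have hg : areThere2Char s.toList 0 = true := by
          simp only [guard0, hsp1, guard1, hsp2, guard2]; simp
        have hA : get_couple s = ([String.ofList [c1], String.ofList [c2]],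
            String.ofList a, String.ofList b) := by
          rw [get_couple, if_neg (by simp [hg])]
          simp only [loop0, hsp1, loop1, hsp2]
          simp
        rw [hA]
        simp [get_couple_alt, splitAtLetter_eq_sp, hsp1, hsp2]

theorem main_ne : ∀ (s : String), D_get_couple s → get_couple s ≠ get_couple_alt s := by
  intro s hD
  obtain ⟨h2, hlt⟩ := hD
  rcases hsp1 : sp s.toList with _ | ⟨⟨a, c1, r1⟩⟩
  · exfalso
    have := countP_zero_of_all_false (sp_none hsp1)
    omega
  · obtain ⟨hcs, ha, hc1⟩ := sp_some hsp1
    rcases hsp2 : sp r1 with _ | ⟨⟨b, c2, r2⟩⟩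
    · exfalso
      have hr1 := countP_zero_of_all_false (sp_none hsp2)
      rw [hcs] at h2
      simp [List.countP_append, hc1,
            countP_zero_of_all_false ha, hr1] at h2
    · obtain ⟨hr1, hb, hc2⟩ := sp_some hsp2
      cases r2 with
      | cons z zs =>
        exfalso
        have : s.toList.dropLast = a ++ c1 :: (b ++ c2 :: (z :: zs).dropLast) := by
          rw [hcs, hr1]
          rw [show a ++ c1 :: (b ++ c2 :: z :: zs) = (a ++ c1 :: b ++ [c2]) ++ (z :: zs) by simp]
          rw [List.dropLast_append_of_ne_nil (by simp)]
          simp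
        rw [this] at hlt
        simp [List.countP_append, hc1, hc2] at hlt
        omega
      | nil =>
        have hg : areThere2Char s.toList 0 = false := by
          simp only [guard0, hsp1, guard1, hsp2, guard2]; simp
        rw [get_couple, if_pos hg]
        simp only [get_couple_alt, splitAtLetter_eq_sp, hsp1, hsp2]
        intro heq
        simp at heq

-- ===== VERDICT (by name: the statement is the Claim_ definition above) =====
theorem get_couple_spec : Claim_unchanged_get_couple := by
  intro s _ hnD
  exact main_eq s hnD

theorem get_couple_changed : Claim_changed_get_couple := by
  unfold Claim_changed_get_couple; decide

theorem get_couple_tight : Claim_exact_get_couple := by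
  intro s _ hD
  exact main_ne s hD
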